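-- pv_equiv track=rewrite | github.com/mbohra07/Lic_Smart_Advisor | src/scraper/utils.py | determine_subcategory
-- ===== SOURCE A (Python) =====
-- from typing import Dict, List, Any, Optional
--
-- def determine_subcategory(policy_name: str, features: List[str]) -> str:
--     """Determine subcategory based on policy name and features"""
--     policy_name_lower = policy_name.lower()
--     features_text = ' '.join(features).lower()
--
--     # Endowment plans
--     if any(word in policy_name_lower for word in ['endowment', 'jeevan anand', 'jeevan lakshya']):
--         return 'Endowment_Plans'
--
--     # Money back plans
--     elif any(word in policy_name_lower for word in ['money back', 'jeevan labh']):
--         return 'Money_Back_Plans'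
--
--     # Term plans
--     elif any(word in policy_name_lower for word in ['term', 'jeevan amar', 'tech term']):
--         return 'Term_Assurance_Plans'
--
--     # Whole life plans
--     elif any(word in policy_name_lower for word in ['whole life', 'jeevan umang', 'jeevan azad']):
--         return 'Whole_Life_Plans'
--
--     # Child plans
--     elif any(word in policy_name_lower for word in ['child', 'amritbaal', 'jeevan tarun']):
--         return 'Child_Plans'
--
--     # Pension plans
--     elif any(word in policy_name_lower for word in ['pension', 'jeevan akshay', 'jeevan shanti']):
--         return 'Pension_Plans'
--
--     # Unit linked plans
--     elif any(word in policy_name_lower for word in ['ulip', 'unit linked', 'nivesh', 'index']):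
--         return 'Unit_Linked_Plans'
--
--     # Micro insurance
--     elif any(word in policy_name_lower for word in ['micro', 'bachat']):
--         return 'Micro_Insurance_Plans'
--
--     # Default based on features
--     elif any(word in features_text for word in ['maturity', 'endowment', 'bonus']):
--         return 'Endowment_Plans'
--     elif any(word in features_text for word in ['money back', 'survival benefit']):
--         return 'Money_Back_Plans'
--     elif any(word in features_text for word in ['term', 'pure protection']):
--         return 'Term_Assurance_Plans'
--     else:
--         return 'Insurance_Plans'
-- ===== SOURCE B (Python) =====
-- # B: aggregate-then-select — one flat priority/keyword table; collect ALL matching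
-- # rules, then return the minimum-priority hit (no ordered short-circuit chain).
-- RULES = [
--     (0, True, ('endowment', 'jeevan anand', 'jeevan lakshya'), 'Endowment_Plans'),
--     (1, True, ('money back', 'jeevan labh'), 'Money_Back_Plans'),
--     (2, True, ('term', 'jeevan amar', 'tech term'), 'Term_Assurance_Plans'),
--     (3, True, ('whole life', 'jeevan umang', 'jeevan azad'), 'Whole_Life_Plans'),
--     (4, True, ('child', 'amritbaal', 'jeevan tarun'), 'Child_Plans'),
--     (5, True, ('pension', 'jeevan akshay', 'jeevan shanti'), 'Pension_Plans'),
--     (6, True, ('ulip', 'unit linked', 'nivesh', 'index'), 'Unit_Linked_Plans'),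
--     (7, True, ('micro', 'bachat'), 'Micro_Insurance_Plans'),
--     (8, False, ('maturity', 'endowment', 'bonus'), 'Endowment_Plans'),
--     (9, False, ('money back', 'survival benefit'), 'Money_Back_Plans'),
--     (10, False, ('term', 'pure protection'), 'Term_Assurance_Plans'),
-- ]
--
-- def determine_subcategory(policy_name, features):
--     name = policy_name.lower()
--     text = ' '.join(features).lower()
--     hits = [(prio, cat) for prio, in_name, kws, cat in RULES
--             if any(kw in (name if in_name else text) for kw in kws)]
--     return min(hits)[1] if hits else 'Insurance_Plans'
-- ===== Notes on version B (the rewrite author's own statement) =====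
-- stated objective: alternative
-- what changed: Replaced the ordered short-circuit if/elif chain with aggregate-then-select over one flat priority table: collect every matching (priority, category) rule, then return the minimum-priority hit.
import Mathlib
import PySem

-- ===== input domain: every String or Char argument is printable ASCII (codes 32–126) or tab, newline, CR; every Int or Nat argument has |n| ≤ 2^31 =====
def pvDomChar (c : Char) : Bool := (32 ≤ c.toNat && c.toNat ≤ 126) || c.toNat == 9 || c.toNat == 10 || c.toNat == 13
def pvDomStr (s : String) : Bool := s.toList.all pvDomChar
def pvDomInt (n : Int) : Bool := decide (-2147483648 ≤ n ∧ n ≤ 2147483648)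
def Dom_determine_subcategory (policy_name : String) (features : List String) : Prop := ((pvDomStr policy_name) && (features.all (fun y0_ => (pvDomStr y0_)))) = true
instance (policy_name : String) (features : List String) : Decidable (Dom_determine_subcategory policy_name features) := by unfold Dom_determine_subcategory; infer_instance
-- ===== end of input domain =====

-- B replaces A's ordered short-circuit if/elif chain by aggregate-then-select over one flat
-- priority table: collect ALL matching rules, return the minimum-priority hit (alternative).
-- ===== PORT A =====
def determine_subcategory (policy_name : String) (features : List String) : String :=
  let policy_name_lower := PySem.Str.lower policy_name
  let features_text := PySem.Str.lower (PySem.Str.join " " features)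
  if (["endowment", "jeevan anand", "jeevan lakshya"].any (fun word => PySem.Str.isIn word policy_name_lower)) then "Endowment_Plans"
  else if (["money back", "jeevan labh"].any (fun word => PySem.Str.isIn word policy_name_lower)) then "Money_Back_Plans"
  else if (["term", "jeevan amar", "tech term"].any (fun word => PySem.Str.isIn word policy_name_lower)) then "Term_Assurance_Plans"
  else if (["whole life", "jeevan umang", "jeevan azad"].any (fun word => PySem.Str.isIn word policy_name_lower)) then "Whole_Life_Plans"
  else if (["child", "amritbaal", "jeevan tarun"].any (fun word => PySem.Str.isIn word policy_name_lower)) then "Child_Plans"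
  else if (["pension", "jeevan akshay", "jeevan shanti"].any (fun word => PySem.Str.isIn word policy_name_lower)) then "Pension_Plans"
  else if (["ulip", "unit linked", "nivesh", "index"].any (fun word => PySem.Str.isIn word policy_name_lower)) then "Unit_Linked_Plans"
  else if (["micro", "bachat"].any (fun word => PySem.Str.isIn word policy_name_lower)) then "Micro_Insurance_Plans"
  else if (["maturity", "endowment", "bonus"].any (fun word => PySem.Str.isIn word features_text)) then "Endowment_Plans"
  else if (["money back", "survival benefit"].any (fun word => PySem.Str.isIn word features_text)) then "Money_Back_Plans"
  else if (["term", "pure protection"].any (fun word => PySem.Str.isIn word features_text)) then "Term_Assurance_Plans"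
  else "Insurance_Plans"

-- ===== PORT B =====
-- RULES: (priority, match-against-name?, keywords, category)
def rulesTable : List (Int × Bool × List String × String) :=
  [ (0, true, ["endowment", "jeevan anand", "jeevan lakshya"], "Endowment_Plans"),
    (1, true, ["money back", "jeevan labh"], "Money_Back_Plans"),
    (2, true, ["term", "jeevan amar", "tech term"], "Term_Assurance_Plans"),
    (3, true, ["whole life", "jeevan umang", "jeevan azad"], "Whole_Life_Plans"),
    (4, true, ["child", "amritbaal", "jeevan tarun"], "Child_Plans"),
    (5, true, ["pension", "jeevan akshay", "jeevan shanti"], "Pension_Plans"),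
    (6, true, ["ulip", "unit linked", "nivesh", "index"], "Unit_Linked_Plans"),
    (7, true, ["micro", "bachat"], "Micro_Insurance_Plans"),
    (8, false, ["maturity", "endowment", "bonus"], "Endowment_Plans"),
    (9, false, ["money back", "survival benefit"], "Money_Back_Plans"),
    (10, false, ["term", "pure protection"], "Term_Assurance_Plans") ]

def determine_subcategory_alt (policy_name : String) (features : List String) : String :=
  let name := PySem.Str.lower policy_name
  let text := PySem.Str.lower (PySem.Str.join " " features)
  -- hits = [(prio, cat) for prio, in_name, kws, cat in RULES if any(kw in (name if in_name else text) for kw in kws)]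
  let hits := (rulesTable.filter
      (fun r => r.2.2.1.any (fun kw => PySem.Str.isIn kw (if r.2.1 then name else text)))).map
      (fun r => (r.1, r.2.2.2))
  -- min(hits)[1] if hits else 'Insurance_Plans'   (min on tuples = lexicographic; PySem.List.min2?)
  match PySem.List.min2? hits (fun p => p.1) (fun p => p.2) with
  | some p => p.2
  | none => "Insurance_Plans"

-- ===== PRECONDITION & SPEC =====
def Spec_determine_subcategory (policy_name : String) (features : List String) (out : String) : Prop := out = determine_subcategory_alt policy_name features
instance (policy_name : String) (features : List String) (out : String) : Decidable (Spec_determine_subcategory policy_name features out) := by unfold Spec_determine_subcategory; infer_instance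

-- ===== CLAIM (what is proved, stated in full; the proofs are below) =====
def Claim_equal_determine_subcategory : Prop := ∀ (policy_name : String) (features : List String), Dom_determine_subcategory policy_name features → Spec_determine_subcategory policy_name features (determine_subcategory policy_name features)

-- ===== LEMMAS AND PROOFS =====

-- select the elements of xs whose flag in cs is true (the shape of filter, with flags precomputed)
def selExpr {β : Type} : List Bool → List β → List β
  | c :: cs, x :: xs => if c then x :: selExpr cs xs else selExpr cs xs
  | _, _ => []

theorem sel_spec {α β : Type} (p : α → Bool) (f : α → β) (rs : List α) :
    (rs.filter p).map f = selExpr (rs.map p) (rs.map f) := by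
  induction rs with
  | nil => rfl
  | cons x xs ih =>
      simp only [List.filter_cons, List.map_cons, selExpr]
      split <;> simp [ih]

set_option maxHeartbeats 4000000 in
theorem key (c1 c2 c3 c4 c5 c6 c7 c8 c9 c10 c11 : Bool) :
    (if c1 then "Endowment_Plans"
     else if c2 then "Money_Back_Plans"
     else if c3 then "Term_Assurance_Plans"
     else if c4 then "Whole_Life_Plans"
     else if c5 then "Child_Plans"
     else if c6 then "Pension_Plans"
     else if c7 then "Unit_Linked_Plans"
     else if c8 then "Micro_Insurance_Plans"
     else if c9 then "Endowment_Plans"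
     else if c10 then "Money_Back_Plans"
     else if c11 then "Term_Assurance_Plans"
     else "Insurance_Plans")
    = (match PySem.List.min2?
          (selExpr [c1, c2, c3, c4, c5, c6, c7, c8, c9, c10, c11]
            [((0 : Int), "Endowment_Plans"), (1, "Money_Back_Plans"), (2, "Term_Assurance_Plans"),
             (3, "Whole_Life_Plans"), (4, "Child_Plans"), (5, "Pension_Plans"),
             (6, "Unit_Linked_Plans"), (7, "Micro_Insurance_Plans"), (8, "Endowment_Plans"),
             (9, "Money_Back_Plans"), (10, "Term_Assurance_Plans")])
          (fun p => p.1) (fun p => p.2) with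
       | some p => p.2
       | none => "Insurance_Plans") := by
  cases c1 <;> cases c2 <;> cases c3 <;> cases c4 <;> cases c5 <;> cases c6 <;> cases c7 <;>
    cases c8 <;> cases c9 <;> cases c10 <;> cases c11 <;> rfl

-- ===== VERDICT (by name: the statement is the Claim_ definition above) =====
set_option maxHeartbeats 4000000 in
theorem determine_subcategory_spec : Claim_equal_determine_subcategory := by
  intro policy_name features _
  unfold Spec_determine_subcategory determine_subcategory determine_subcategory_alt
  simp only []
  rw [sel_spec]
  simp only [rulesTable, List.map_cons, List.map_nil]
  exact key _ _ _ _ _ _ _ _ _ _ _
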